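-- pv_equiv track=rewrite | github.com/WCRP-CMIP/CMIPLD | cmipld/generate/new_issue.py | parse_issue_body
-- ===== SOURCE A (Python) =====
-- def parse_issue_body(issue_body):
--     if not issue_body:
--         return {}
--     lines      = issue_body.split('\n')
--     issue_data = {}
--     current_key = None
--     for line in lines:
--         if line.startswith('### '):
--             current_key = line[4:].strip().replace(' ', '_').replace('-', '_').lower()
--             issue_data[current_key] = ''
--         elif current_key:
--             issue_data[current_key] += line.strip() + ' '
--     placeholder = {'not specified', '_no response_', 'none', ''}
--     for key in issue_data:
--         issue_data[key] = issue_data[key].strip()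
--         if issue_data[key].lower() in placeholder:
--             issue_data[key] = ''
--     return issue_data
-- ===== SOURCE B (Python) =====
-- def parse_issue_body(issue_body):
--     if not issue_body:
--         return {}
--     placeholder = {'not specified', '_no response_', 'none', ''}
--     result = {}
--     lines = iter(issue_body.split('\n'))
--     # advance to the first header, discarding the preamble
--     header = next((l for l in lines if l.startswith('### ')), None)
--     while header is not None:
--         # collect this section's body: everything up to the next header
--         body = []
--         nxt = None
--         for l in lines:
--             if l.startswith('### '):
--                 nxt = l
--                 break
--             body.append(l)
--         key = header[4:].strip().replace(' ', '_').replace('-', '_').lower()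
--         value = ' '.join(l.strip() for l in body).strip()
--         result[key] = '' if value.lower() in placeholder else value
--         header = nxt
--     return result
-- ===== Notes on version B (the rewrite author's own statement) =====
-- stated objective: alternative
-- what changed: B replaces A's single stateful line loop (a current-key register, per-line string accumulation into the dict, and a second normalisation pass over the whole dict) by a section-at-a-time scanner: it advances to each '### ' header, collects that section's lines, and performs one dict assignment per section with the joined, already-normalised value.
-- outside the precondition, e.g. on parse_issue_body('### \nhello'): A returns {'': ''}, B returns {'': 'hello'}; on parse_issue_body('### '): A returns {'': ''}, B returns {'': ''}
import Mathlib
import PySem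

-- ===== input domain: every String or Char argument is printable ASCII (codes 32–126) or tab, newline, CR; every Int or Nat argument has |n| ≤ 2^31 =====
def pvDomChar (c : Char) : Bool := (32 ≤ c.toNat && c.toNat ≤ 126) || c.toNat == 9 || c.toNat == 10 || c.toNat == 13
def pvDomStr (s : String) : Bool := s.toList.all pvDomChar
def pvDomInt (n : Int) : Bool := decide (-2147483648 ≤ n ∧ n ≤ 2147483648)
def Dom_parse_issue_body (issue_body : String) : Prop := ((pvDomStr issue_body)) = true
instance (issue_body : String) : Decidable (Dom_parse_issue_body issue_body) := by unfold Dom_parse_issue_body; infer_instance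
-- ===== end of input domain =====

-- B re-parses the issue body one '### '-headed section at a time (scan to header, collect body,
-- one normalised dict assignment per section) instead of A's stateful line loop with a final
-- normalisation pass; same cost, different decomposition.


-- ===== PORT A =====
-- line[4:].strip().replace(' ', '_').replace('-', '_').lower()   (shared by both pythons verbatim)
def pvKeyOf (line : String) : String :=
  PySem.Str.lower (PySem.Str.replace (PySem.Str.replace
    (PySem.Str.strip (PySem.Str.slice line (some 4) none)) " " "_") "-" "_")

-- placeholder = {'not specified', '_no response_', 'none', ''}   (same literal in both pythons)
def pvPlaceholder : PySem.Set String :=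
  PySem.Set.ofList ["not specified", "_no response_", "none", ""]

-- one iteration of A's line loop; state = (issue_data, current_key)
def pvStepA (st : PySem.Dict String String × Option String) (line : String) :
    PySem.Dict String String × Option String :=
  if PySem.Str.startswith line "### " then
    (st.1.insert (pvKeyOf line) "", some (pvKeyOf line))
  else
    match st.2 with
    | some ck =>
        if ck ≠ "" then
          (st.1.modify ck "" (fun v => v ++ PySem.Str.strip line ++ " "), some ck)
        else st
    | none => st

-- A's final `for key in issue_data:` pass (its two in-place updates of issue_data[key], fused value-identically)
def pvFinalizeA (d : PySem.Dict String String) : PySem.Dict String String :=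
  d.keys.foldl (fun d' k => d'.modify k ""
    (fun v =>
      let s := PySem.Str.strip v
      if PySem.Set.contains pvPlaceholder (PySem.Str.lower s) then "" else s)) d

def parse_issue_body (issue_body : String) : List (String × String) :=
  if issue_body = "" then []
  else
    -- issue_body.split('\n'): the separator is the nonempty literal "\n", so split? is never none
    let lines := (PySem.Str.split? issue_body "\n").getD []
    (pvFinalizeA (lines.foldl pvStepA (PySem.Dict.empty, none)).1).items

-- ===== PORT B =====
def pvIsHeader (l : String) : Bool := PySem.Str.startswith l "### "

-- '' if value.lower() in placeholder else value
def pvNormB (value : String) : String :=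
  if PySem.Set.contains pvPlaceholder (PySem.Str.lower value) then "" else value

-- Source B's while loop: one call per section; `rest` is the not-yet-consumed tail of the line iterator,
-- the inner for/break consumes the body (takeWhile) and stops at the next header (dropWhile)
def pvBuildB (header : String) (rest : List String)
    (result : PySem.Dict String String) : PySem.Dict String String :=
  let body := rest.takeWhile (fun l => !pvIsHeader l)
  let value := PySem.Str.strip (PySem.Str.join " " (body.map PySem.Str.strip))
  let result' := result.insert (pvKeyOf header) (pvNormB value)
  match h : rest.dropWhile (fun l => !pvIsHeader l) with
  | [] => result'
  | nxt :: t => pvBuildB nxt t result'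
termination_by rest.length
decreasing_by
  have h1 := List.length_dropWhile_le (fun l => !pvIsHeader l) rest
  rw [h] at h1
  simpa using Nat.lt_of_lt_of_le (Nat.lt_succ_self t.length) h1

def parse_issue_body_alt (issue_body : String) : List (String × String) :=
  if issue_body = "" then []
  else
    let lines := (PySem.Str.split? issue_body "\n").getD []
    -- next((l for l in lines if l.startswith('### ')), None): skip the preamble
    match lines.dropWhile (fun l => !pvIsHeader l) with
    | [] => []
    | h :: t => (pvBuildB h t PySem.Dict.empty).items

-- ===== PRECONDITION & SPEC =====
-- Pre_ excludes bodies containing a '### ' header line whose derived field name is empty: there A's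
-- falsy current-key test silently drops that section's text (key '' keeps value '') while B keeps it —
-- a degenerate nameless-field corner for which neither behaviour is specified.
def Pre_parse_issue_body (issue_body : String) : Prop :=
  ∀ l ∈ (PySem.Str.split? issue_body "\n").getD [],
    PySem.Str.startswith l "### " = true →
      PySem.Str.lower (PySem.Str.replace (PySem.Str.replace
        (PySem.Str.strip (PySem.Str.slice l (some 4) none)) " " "_") "-" "_") ≠ ""
instance (issue_body : String) : Decidable (Pre_parse_issue_body issue_body) := by
  unfold Pre_parse_issue_body; infer_instance

def pvWitness_parse_issue_body : String := "### Name\nAlice"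

def Spec_parse_issue_body (issue_body : String) (out : List (String × String)) : Prop :=
  out = parse_issue_body_alt issue_body
instance (issue_body : String) (out : List (String × String)) : Decidable (Spec_parse_issue_body issue_body out) := by
  unfold Spec_parse_issue_body; infer_instance

-- ===== CLAIM (what is proved, stated in full; the proofs are below) =====
def Claim_equal_parse_issue_body : Prop :=
  ∀ (issue_body : String), Dom_parse_issue_body issue_body →
    Pre_parse_issue_body issue_body →
    Spec_parse_issue_body issue_body (parse_issue_body issue_body)

-- ===== LEMMAS AND PROOFS =====

-- the section structure of a line list: (header, body) per '### ' header, preamble discarded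
def pvBlocks : List String → List (String × List String)
  | [] => []
  | l :: ls =>
    if pvIsHeader l then
      (l, ls.takeWhile (fun x => !pvIsHeader x)) :: pvBlocks (ls.dropWhile (fun x => !pvIsHeader x))
    else pvBlocks ls
termination_by ls => ls.length
decreasing_by
  · exact Nat.lt_succ_of_le (List.length_dropWhile_le _ _)
  · exact Nat.lt_succ_self _

-- A's raw accumulated value for a body: strip(l) + ' ' per line
def pvRaw : List String → String
  | [] => ""
  | l :: ls => (PySem.Str.strip l ++ " ") ++ pvRaw ls

-- A's normalisation of one value
def pvNormA (v : String) : String :=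
  let s := PySem.Str.strip v
  if PySem.Set.contains pvPlaceholder (PySem.Str.lower s) then "" else s

def pvAccum (d : PySem.Dict String String) (k : String) (body : List String) :
    PySem.Dict String String :=
  body.foldl (fun d l => d.modify k "" (fun v => v ++ PySem.Str.strip l ++ " ")) d

def pvDictRaw (bs : List (String × List String)) (d : PySem.Dict String String) :
    PySem.Dict String String :=
  bs.foldl (fun d p => d.insert (pvKeyOf p.1) (pvRaw p.2)) d

def pvDictB (bs : List (String × List String)) (d : PySem.Dict String String) :
    PySem.Dict String String :=
  bs.foldl (fun d p => d.insert (pvKeyOf p.1)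
    (pvNormB (PySem.Str.strip (PySem.Str.join " " (p.2.map PySem.Str.strip))))) d

def pvMapD (d : PySem.Dict String String) : PySem.Dict String String :=
  PySem.Dict.mk (d.items.map (fun p => (p.1, pvNormA p.2)))

theorem pv_collapse (body : List String) : ∀ (d : PySem.Dict String String) (k s : String),
    pvAccum (d.insert k s) k body = d.insert k (s ++ pvRaw body) := by
  induction body with
  | nil => intro d k s; simp [pvAccum, pvRaw, String.append_empty]
  | cons l ls ih =>
    intro d k s
    simp only [pvAccum, List.foldl_cons, pvRaw] at ih ⊢
    rw [PySem.Dict.modify, PySem.Dict.getD_insert_self, PySem.Dict.insert_insert_self, ih]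
    congr 1
    simp [String.append_assoc]

theorem pv_mainA (lines : List String)
    (hg : ∀ l ∈ lines, pvIsHeader l = true → pvKeyOf l ≠ "") :
    (∀ d, (lines.foldl pvStepA (d, none)).1 = pvDictRaw (pvBlocks lines) d)
    ∧ (∀ d k, k ≠ "" → (lines.foldl pvStepA (d, some k)).1 =
        pvDictRaw (pvBlocks (lines.dropWhile (fun x => !pvIsHeader x)))
          (pvAccum d k (lines.takeWhile (fun x => !pvIsHeader x)))) := by
  induction lines with
  | nil =>
    refine ⟨fun d => ?_, fun d k hk => ?_⟩ <;> simp [pvBlocks, pvDictRaw, pvAccum]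
  | cons l ls ih =>
    have hg' : ∀ x ∈ ls, pvIsHeader x = true → pvKeyOf x ≠ "" :=
      fun x hx => hg x (List.mem_cons_of_mem _ hx)
    obtain ⟨ih1, ih2⟩ := ih hg'
    by_cases hl : pvIsHeader l = true
    · have hkey : pvKeyOf l ≠ "" := hg l (List.mem_cons_self) hl
      have hstep : ∀ st : PySem.Dict String String × Option String,
          pvStepA st l = (st.1.insert (pvKeyOf l) "", some (pvKeyOf l)) := by
        intro st; simp [pvStepA, pvIsHeader] at hl ⊢; simp [hl]
      have core : ∀ d : PySem.Dict String String,
          (ls.foldl pvStepA (d.insert (pvKeyOf l) "", some (pvKeyOf l))).1 =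
            pvDictRaw (pvBlocks (l :: ls)) d := by
        intro d
        rw [ih2 (d.insert (pvKeyOf l) "") (pvKeyOf l) hkey, pv_collapse]
        have hb : pvBlocks (l :: ls) =
            (l, ls.takeWhile (fun x => !pvIsHeader x)) ::
              pvBlocks (ls.dropWhile (fun x => !pvIsHeader x)) := by
          rw [pvBlocks]; simp [hl]
        rw [hb]
        simp [pvDictRaw, String.empty_append]
      constructor
      · intro d
        simp only [List.foldl_cons, hstep]
        exact core d
      · intro d k hk
        simp only [List.foldl_cons, hstep]
        have htw : (l :: ls).takeWhile (fun x => !pvIsHeader x) = [] := by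
          simp [hl]
        have hdw : (l :: ls).dropWhile (fun x => !pvIsHeader x) = l :: ls := by
          simp [hl]
        rw [htw, hdw]
        exact core d
    · have hl' : pvIsHeader l = false := by simpa using hl
      have htw : (l :: ls).takeWhile (fun x => !pvIsHeader x) =
          l :: ls.takeWhile (fun x => !pvIsHeader x) := by simp [hl']
      have hdw : (l :: ls).dropWhile (fun x => !pvIsHeader x) =
          ls.dropWhile (fun x => !pvIsHeader x) := by simp [hl']
      have hb : pvBlocks (l :: ls) = pvBlocks ls := by rw [pvBlocks]; simp [hl']
      constructor
      · intro d
        have hstep : pvStepA (d, none) l = (d, none) := by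
          simp [pvStepA, pvIsHeader] at hl' ⊢; simp [hl']
        simp only [List.foldl_cons, hstep, hb]
        exact ih1 d
      · intro d k hk
        have hstep : pvStepA (d, some k) l =
            (d.modify k "" (fun v => v ++ PySem.Str.strip l ++ " "), some k) := by
          simp [pvStepA, pvIsHeader] at hl' ⊢; simp [hl', hk]
        simp only [List.foldl_cons, hstep, htw, hdw]
        rw [ih2 _ k hk]
        rfl

theorem pv_blocks_dropWhile (lines : List String) :
    pvBlocks (lines.dropWhile (fun x => !pvIsHeader x)) = pvBlocks lines := by
  induction lines with
  | nil => rfl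
  | cons l ls ih =>
    by_cases hl : pvIsHeader l = true
    · simp [hl]
    · have hl' : pvIsHeader l = false := by simpa using hl
      rw [List.dropWhile_cons_of_pos (by simp [hl']), ih]
      conv_rhs => rw [pvBlocks]
      simp [hl']

theorem pv_buildB_aux : ∀ (n : Nat) (rest : List String), rest.length ≤ n →
    ∀ (hd : String), pvIsHeader hd = true →
    ∀ d, pvBuildB hd rest d = pvDictB (pvBlocks (hd :: rest)) d := by
  intro n
  induction n with
  | zero =>
    intro rest hlen hd hhd d
    have : rest = [] := List.eq_nil_of_length_eq_zero (Nat.le_zero.mp hlen)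
    subst this
    rw [pvBuildB]
    simp [pvBlocks, pvDictB, hhd]
  | succ n ih =>
    intro rest hlen hd hhd d
    rw [pvBuildB]
    cases hdw : rest.dropWhile (fun l => !pvIsHeader l) with
    | nil =>
      simp only []
      have hb : pvBlocks (hd :: rest) =
          (hd, rest.takeWhile (fun x => !pvIsHeader x)) ::
            pvBlocks (rest.dropWhile (fun x => !pvIsHeader x)) := by
        rw [pvBlocks]; simp [hhd]
      rw [hb, hdw]
      simp [pvBlocks, pvDictB]
    | cons nxt t =>
      simp only []
      have hnxt : pvIsHeader nxt = true := by
        have h2 := @List.head_dropWhile_not _ (fun l => !pvIsHeader l) rest (by simp [hdw])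
        simp only [hdw, List.head_cons] at h2
        simpa using h2
      have hlen' : t.length ≤ n := by
        have h1 := List.length_dropWhile_le (fun l => !pvIsHeader l) rest
        rw [hdw] at h1
        simp at h1
        omega
      rw [ih t hlen' nxt hnxt]
      have hb : pvBlocks (hd :: rest) =
          (hd, rest.takeWhile (fun x => !pvIsHeader x)) :: pvBlocks (nxt :: t) := by
        rw [pvBlocks]; simp [hhd, hdw]
      rw [hb]
      simp [pvDictB]

theorem pv_buildB_eq (rest : List String) (hd : String) (hhd : pvIsHeader hd = true)
    (d : PySem.Dict String String) : pvBuildB hd rest d = pvDictB (pvBlocks (hd :: rest)) d :=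
  pv_buildB_aux rest.length rest le_rfl hd hhd d

theorem pv_rstrip_space (x : List Char) : PySem.Chars.rstrip (x ++ [' ']) = PySem.Chars.rstrip x := by
  simp [PySem.Chars.rstrip, List.reverse_append]
  rfl

theorem pv_strip_space (v : List Char) : PySem.Chars.strip (v ++ [' ']) = PySem.Chars.strip v := by
  simp only [PySem.Chars.strip, PySem.Chars.lstrip]
  rw [List.dropWhile_append]
  by_cases he : (List.dropWhile PySem.Chars.isspace v).isEmpty
  · have hnil : List.dropWhile PySem.Chars.isspace v = [] := by simpa using he
    simp [hnil]
    decide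
  · simp [he, pv_rstrip_space]

theorem pv_flatten_join : ∀ (p : List Char) (ps : List (List Char)),
    ((p :: ps).map (· ++ [' '])).flatten = PySem.Chars.join [' '] (p :: ps) ++ [' '] := by
  intro p ps
  induction ps generalizing p with
  | nil => simp [PySem.Chars.join_singleton]
  | cons q qs ih =>
    conv_lhs => rw [List.map_cons, List.flatten_cons, ih q]
    rw [PySem.Chars.join_cons_cons]
    simp [List.append_assoc]

theorem pv_raw_toList (body : List String) :
    (pvRaw body).toList = ((body.map (fun l => PySem.Chars.strip l.toList)).map (· ++ [' '])).flatten := by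
  induction body with
  | nil => rfl
  | cons l ls ih => simp [pvRaw, ih]

theorem pv_join_toList (parts : List String) :
    (PySem.Str.join " " (parts.map PySem.Str.strip)).toList
      = PySem.Chars.join [' '] (parts.map (fun l => PySem.Chars.strip l.toList)) := by
  simp [PySem.Str.join]
  congr 1
  simp [Function.comp_def]

theorem pv_strip_raw (body : List String) :
    PySem.Str.strip (pvRaw body) = PySem.Str.strip (PySem.Str.join " " (body.map PySem.Str.strip)) := by
  apply String.toList_inj.mp
  cases body with
  | nil => rfl
  | cons p ps =>
    simp only [PySem.Str.toList_strip]
    rw [pv_raw_toList, pv_join_toList, List.map_cons, pv_flatten_join, pv_strip_space]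

theorem pv_contains_mapD (d : PySem.Dict String String) (k : String) :
    (pvMapD d).contains k = d.contains k := by
  simp [pvMapD, PySem.Dict.contains, List.any_map, Function.comp_def]

theorem pv_mapD_insert (d : PySem.Dict String String) (k v : String) :
    pvMapD (d.insert k v) = (pvMapD d).insert k (pvNormA v) := by
  have hcm := pv_contains_mapD d k
  unfold pvMapD at hcm ⊢
  by_cases hc : d.contains k = true
  · rw [PySem.Dict.insert, if_pos hc, PySem.Dict.insert, if_pos (by rw [hcm]; exact hc)]
    simp only [List.map_map]
    refine congrArg PySem.Dict.mk (List.map_congr_left ?_)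
    intro p hp
    by_cases hk : p.1 = k <;> simp [hk]
  · rw [PySem.Dict.insert, if_neg hc, PySem.Dict.insert, if_neg (by rw [hcm]; exact hc)]
    simp

theorem pv_norm_raw (bd : List String) :
    pvNormA (pvRaw bd)
      = pvNormB (PySem.Str.strip (PySem.Str.join " " (bd.map PySem.Str.strip))) := by
  rw [show pvNormA (pvRaw bd) = pvNormB (PySem.Str.strip (pvRaw bd)) from rfl, pv_strip_raw]

theorem pv_main_map (bs : List (String × List String)) :
    ∀ d, pvDictB bs (pvMapD d) = pvMapD (pvDictRaw bs d) := by
  induction bs with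
  | nil => intro d; rfl
  | cons b bs ih =>
    intro d
    simp only [pvDictB, pvDictRaw, List.foldl_cons] at ih ⊢
    rw [← pv_norm_raw, ← pv_mapD_insert, ih]

theorem pv_cons_modify (k k' w : String) (rest : List (String × String)) (g : String → String)
    (hne : k ≠ k') :
    (PySem.Dict.mk ((k, w) :: rest)).modify k' "" g
      = PySem.Dict.mk ((k, w) :: ((PySem.Dict.mk rest).modify k' "" g).items) := by
  have hbeq : (k == k') = false := beq_eq_false_iff_ne.mpr hne
  simp only [PySem.Dict.modify, PySem.Dict.getD, PySem.Dict.get?_mk_cons, hbeq]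
  simp only [Bool.false_eq_true, if_false]
  rw [PySem.Dict.insert, PySem.Dict.insert]
  have hcont : (PySem.Dict.mk ((k, w) :: rest)).contains k'
      = (PySem.Dict.mk rest).contains k' := by
    simp [PySem.Dict.contains, hbeq]
  by_cases hc : (PySem.Dict.mk rest).contains k' = true
  · rw [if_pos (by rw [hcont]; exact hc), if_pos hc]
    simp
    exact fun h => absurd h hne
  · rw [if_neg (by rw [hcont]; exact hc), if_neg hc]
    simp

theorem pv_foldl_modify_cons (ks : List String) (g : String → String) :
    ∀ (k w : String) (rest : List (String × String)), (∀ k' ∈ ks, k' ≠ k) →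
    ks.foldl (fun d' k' => d'.modify k' "" g) (PySem.Dict.mk ((k, w) :: rest))
      = PySem.Dict.mk ((k, w) ::
          (ks.foldl (fun d' k' => d'.modify k' "" g) (PySem.Dict.mk rest)).items) := by
  induction ks with
  | nil => intro k w rest h; rfl
  | cons a as ih =>
    intro k w rest h
    simp only [List.foldl_cons]
    rw [pv_cons_modify k a w rest g (fun he => h a List.mem_cons_self he.symm)]
    rw [ih k w _ (fun k' hk' => h k' (List.mem_cons_of_mem _ hk'))]

theorem pv_finalize_items (g : String → String) :
    ∀ (items : List (String × String)), (items.map (·.1)).Nodup →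
    (items.map (·.1)).foldl (fun d' k => d'.modify k "" g) (PySem.Dict.mk items)
      = PySem.Dict.mk (items.map (fun p => (p.1, g p.2))) := by
  intro items
  induction items with
  | nil => intro _; rfl
  | cons p rest ih =>
    intro hnd
    obtain ⟨k, v⟩ := p
    simp only [List.map_cons, List.nodup_cons] at hnd
    obtain ⟨hk, hnd'⟩ := hnd
    simp only [List.map_cons, List.foldl_cons]
    have hmod : (PySem.Dict.mk ((k, v) :: rest)).modify k "" g
        = PySem.Dict.mk ((k, g v) :: rest) := by
      have hne : ∀ q ∈ rest, (q.1 == k) = false := by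
        intro q hq
        exact beq_eq_false_iff_ne.mpr (fun h => hk (h ▸ List.mem_map_of_mem hq))
      simp only [PySem.Dict.modify, PySem.Dict.getD, PySem.Dict.get?_mk_cons]
      rw [PySem.Dict.insert, if_pos (by simp [PySem.Dict.contains])]
      congr 1
      simp only [List.map_cons, beq_self_eq_true, if_true, Option.getD_some]
      refine congrArg₂ _ (by simp) ?_
      conv_rhs => rw [← List.map_id rest]
      apply List.map_congr_left
      intro q hq
      simp [hne q hq]
    rw [hmod, pv_foldl_modify_cons _ _ k (g v) rest
      (by intro k' hk' he; exact hk (he ▸ hk')), ih hnd']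

theorem pv_finalizeA_eq (d : PySem.Dict String String) (hnd : d.keys.Nodup) :
    pvFinalizeA d = pvMapD d :=
  pv_finalize_items pvNormA d.items hnd

theorem pv_nodup_dictRaw (bs : List (String × List String)) :
    ∀ d : PySem.Dict String String, d.keys.Nodup → (pvDictRaw bs d).keys.Nodup := by
  induction bs with
  | nil => intro d h; exact h
  | cons b bs ih =>
    intro d h
    simp only [pvDictRaw, List.foldl_cons] at ih ⊢
    exact ih _ (PySem.Dict.nodup_keys_insert _ _ _ h)

-- ===== VERDICT (by name: the statement is the Claim_ definition above) =====
theorem parse_issue_body_spec : Claim_equal_parse_issue_body := by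
  intro s hdom hpre
  unfold Spec_parse_issue_body parse_issue_body parse_issue_body_alt
  by_cases hs : s = ""
  · simp [hs]
  · simp only [if_neg hs]
    set lines := (PySem.Str.split? s "\n").getD [] with hlines
    have hg : ∀ l ∈ lines, pvIsHeader l = true → pvKeyOf l ≠ "" := by
      intro l hl hh
      exact hpre l hl hh
    obtain ⟨m1, _⟩ := pv_mainA lines hg
    rw [m1 PySem.Dict.empty]
    have hnodup : (pvDictRaw (pvBlocks lines) PySem.Dict.empty).keys.Nodup :=
      pv_nodup_dictRaw _ _ List.nodup_nil
    rw [pv_finalizeA_eq _ hnodup, ← pv_main_map]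
    cases hdw : lines.dropWhile (fun l => !pvIsHeader l) with
    | nil =>
      have hb : pvBlocks lines = [] := by
        rw [← pv_blocks_dropWhile lines, hdw]
        simp [pvBlocks]
      rw [hb]; rfl
    | cons h t =>
      have hh : pvIsHeader h = true := by
        have h2 := @List.head_dropWhile_not _ (fun l => !pvIsHeader l) lines (by simp [hdw])
        simp only [hdw, List.head_cons] at h2
        simpa using h2
      show (pvDictB (pvBlocks lines) (pvMapD PySem.Dict.empty)).items
        = (pvBuildB h t PySem.Dict.empty).items
      rw [pv_buildB_eq t h hh, ← pv_blocks_dropWhile lines, hdw]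
      rfl
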